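-- pv_equiv track=rewrite | github.com/saicooo/Algorithm | algorithm/2_1/Mohamed_Mahmoud_lb2/src/main.py | separate_array
-- ===== SOURCE A (Python) =====
-- def insertion_sort(original_array):
--     for i in range(1, len(original_array)):
--         key = original_array[i]
--         j = i - 1
--
--         while j >= 0 and abs(original_array[j]) < abs(key):
--             original_array[j + 1] = original_array[j]
--             j -= 1
--
--         original_array[j + 1] = key
--
--     return original_array
--
-- def separate_array(array, min_run):
--     runs = [[]]
--
--     for i in range(len(array)):
--         if len(runs[-1]) < min_run:
--             runs[-1].append(array[i])
--             if i == len(array) - 1: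
--                 insertion_sort(runs[-1])
--         else:
--             ascending, descending = _is_sorted_abs(runs[-1])
--
--             if ascending and not descending:
--                 if abs(array[i]) > abs(runs[-1][-1]):
--                     runs[-1].append(array[i])
--                 else:
--                     insertion_sort(runs[-1])
--                     runs.append([array[i]])
--                 continue
--
--             if not ascending and descending:
--                 if abs(array[i]) < abs(runs[-1][-1]):
--                     runs[-1].append(array[i])
--                 else:
--                     insertion_sort(runs[-1])
--                     runs.append([array[i]])
--                 continue
--
--             if not ascending and not descending:
--                 insertion_sort(runs[-1])
--                 runs.append([array[i]])
--                 continue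
--
--             if ascending and descending:
--                 if abs(array[i]) == abs(runs[-1][-1]):
--                     runs[-1].append(array[i])
--                     continue
--                 insertion_sort(runs[-1])
--                 runs.append([array[i]])
--
--     return runs
--
-- def _is_sorted_abs(arr):
--     ascending = all(abs(arr[i]) <= abs(arr[i + 1]) for i in range(len(arr) - 1))
--     descending = all(abs(arr[i]) >= abs(arr[i + 1]) for i in range(len(arr) - 1))
--     return ascending, descending
-- ===== SOURCE B (Python) =====
-- def separate_array(array, min_run):
--     # One pass: ascending/descending-by-abs flags of the current run are maintained
--     # incrementally per append (A rescans the whole run each iteration), and closed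
--     # runs are sorted with the built-in stable sort instead of insertion sort.
--     # The final run is sorted only if it never filled to min_run (matching A).
--     runs = [[]]
--     asc = desc = True
--     for x in array:
--         cur = runs[-1]
--         a = abs(x)
--         if len(cur) < min_run:
--             if cur:
--                 l = abs(cur[-1])
--                 asc = asc and l <= a
--                 desc = desc and a <= l
--             cur.append(x)
--         else:
--             l = abs(cur[-1])
--             grow = (a == l) if (asc and desc) else ((asc and l < a) or (desc and a < l))
--             if grow:
--                 asc = asc and l <= a
--                 desc = desc and a <= l
--                 cur.append(x)
--             else:
--                 runs[-1] = sorted(cur, key=abs, reverse=True)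
--                 runs.append([x])
--                 asc = desc = True
--     if len(runs[-1]) <= min_run:
--         runs[-1] = sorted(runs[-1], key=abs, reverse=True)
--     return runs
-- ===== Notes on version B (the rewrite author's own statement) =====
-- stated objective: faster
-- what changed: B maintains the current run's ascending/descending-by-abs flags incrementally on each append (A rescans the whole run with _is_sorted_abs every iteration) and sorts closed runs with the built-in stable sort instead of a hand-written O(L^2) insertion sort.
import Mathlib
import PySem

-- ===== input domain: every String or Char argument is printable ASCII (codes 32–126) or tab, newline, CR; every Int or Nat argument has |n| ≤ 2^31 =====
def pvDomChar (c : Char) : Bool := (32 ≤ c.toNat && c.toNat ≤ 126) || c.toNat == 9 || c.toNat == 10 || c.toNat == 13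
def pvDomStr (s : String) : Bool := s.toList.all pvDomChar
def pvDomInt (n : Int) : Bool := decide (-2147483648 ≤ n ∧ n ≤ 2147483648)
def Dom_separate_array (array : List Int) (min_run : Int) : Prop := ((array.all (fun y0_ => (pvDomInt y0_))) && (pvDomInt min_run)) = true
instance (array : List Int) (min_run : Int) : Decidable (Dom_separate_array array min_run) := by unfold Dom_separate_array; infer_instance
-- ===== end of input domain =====

-- B replaces A's per-iteration whole-run rescan and hand-written insertion sort by
-- incrementally maintained monotonicity flags and the built-in stable sort (objective: faster).

-- ===== PORT A =====
-- insert key into the sorted-descending-by-abs prefix; the Python while loop shifts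
-- elements from the right while abs < abs(key), which places key exactly before the
-- first element (from the left) of strictly smaller abs — the position this recursion finds.
def pvInsertAbs (key : Int) : List Int → List Int
  | [] => [key]
  | y :: ys => if |y| < |key| then key :: y :: ys else y :: pvInsertAbs key ys

-- insertion_sort: each element in turn is inserted into the sorted prefix
def pvInsertionSort (l : List Int) : List Int :=
  l.foldl (fun acc k => pvInsertAbs k acc) []

-- _is_sorted_abs: 'all' over adjacent pairs
def pvAscAbs : List Int → Bool
  | [] => true
  | [_] => true
  | a :: b :: t => (|a| ≤ |b| : Bool) && pvAscAbs (b :: t)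

def pvDescAbs : List Int → Bool
  | [] => true
  | [_] => true
  | a :: b :: t => (|b| ≤ |a| : Bool) && pvDescAbs (b :: t)

-- the for loop over range(len(array)); 'i == len(array)-1' is 'rest = []'
def pvSepLoopA (minRun : Int) : List Int → List (List Int) → List (List Int)
  | [], runs => runs
  | x :: rest, runs =>
    let cur := (runs.getLast?).getD []               -- runs[-1]
    if (cur.length : Int) < minRun then
      let cur1 := cur ++ [x]
      let cur2 := if rest.isEmpty then pvInsertionSort cur1 else cur1
      pvSepLoopA minRun rest (runs.dropLast ++ [cur2])
    else
      -- runs[-1][-1]; Python raises IndexError when the run is empty (min_run ≤ 0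
      -- with a nonempty array) — those inputs are excluded by Pre_separate_array
      let lst := (cur.getLast?).getD 0
      let ascending := pvAscAbs cur
      let descending := pvDescAbs cur
      if ascending && !descending then
        if |lst| < |x| then pvSepLoopA minRun rest (runs.dropLast ++ [cur ++ [x]])
        else pvSepLoopA minRun rest (runs.dropLast ++ [pvInsertionSort cur] ++ [[x]])
      else if !ascending && descending then
        if |x| < |lst| then pvSepLoopA minRun rest (runs.dropLast ++ [cur ++ [x]])
        else pvSepLoopA minRun rest (runs.dropLast ++ [pvInsertionSort cur] ++ [[x]])
      else if !ascending && !descending then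
        pvSepLoopA minRun rest (runs.dropLast ++ [pvInsertionSort cur] ++ [[x]])
      else
        if |x| = |lst| then pvSepLoopA minRun rest (runs.dropLast ++ [cur ++ [x]])
        else pvSepLoopA minRun rest (runs.dropLast ++ [pvInsertionSort cur] ++ [[x]])

def separate_array (array : List Int) (min_run : Int) : List (List Int) :=
  pvSepLoopA min_run array [[]]

-- ===== PORT B =====
-- sorted(cur, key=abs, reverse=True)
def pvSortRun (l : List Int) : List Int := PySem.List.sorted l (fun v => |v|) true

-- B's single pass, carrying the current run's flags in the loop state
def pvSepLoopB (minRun : Int) : List Int → List (List Int) → Bool → Bool → List (List Int)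
  | [], runs, _, _ => runs
  | x :: rest, runs, asc, desc =>
    let cur := (runs.getLast?).getD []               -- runs[-1]
    let a := |x|
    if (cur.length : Int) < minRun then
      match cur.getLast? with
      | none => pvSepLoopB minRun rest (runs.dropLast ++ [cur ++ [x]]) asc desc
      | some lstv =>
          pvSepLoopB minRun rest (runs.dropLast ++ [cur ++ [x]])
            (asc && (|lstv| ≤ a : Bool)) (desc && (a ≤ |lstv| : Bool))
    else
      -- cur[-1]; on empty cur (min_run ≤ 0, nonempty array) Python B raises — outside Pre_
      let l := |(cur.getLast?).getD 0|
      let grow := if asc && desc then (a = l : Bool)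
                  else (asc && (l < a : Bool)) || (desc && (a < l : Bool))
      if grow then
        pvSepLoopB minRun rest (runs.dropLast ++ [cur ++ [x]])
          (asc && (l ≤ a : Bool)) (desc && (a ≤ l : Bool))
      else
        pvSepLoopB minRun rest (runs.dropLast ++ [pvSortRun cur] ++ [[x]]) true true

def separate_array_alt (array : List Int) (min_run : Int) : List (List Int) :=
  let runs := pvSepLoopB min_run array [[]] true true
  let lastr := (runs.getLast?).getD []
  if ((lastr.length : Int) ≤ min_run) then runs.dropLast ++ [pvSortRun lastr] else runs

-- ===== PRECONDITION & SPEC =====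
-- Pre_ excludes exactly the crashes: with min_run ≤ 0 and a nonempty array both
-- Pythons index runs[-1][-1] on an empty run and raise IndexError.
def Pre_separate_array (array : List Int) (min_run : Int) : Prop :=
  array = [] ∨ 1 ≤ min_run
instance (array : List Int) (min_run : Int) : Decidable (Pre_separate_array array min_run) := by
  unfold Pre_separate_array; infer_instance

def pvWitness_separate_array : List Int × Int := ([3, -1, 4, 1, -5, 9, 2, 6], 3)

def Spec_separate_array (array : List Int) (min_run : Int) (out : List (List Int)) : Prop :=
  out = separate_array_alt array min_run
instance (array : List Int) (min_run : Int) (out : List (List Int)) : Decidable (Spec_separate_array array min_run out) := by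
  unfold Spec_separate_array; infer_instance

-- ===== CLAIM (what is proved, stated in full; the proofs are below) =====
def Claim_equal_separate_array : Prop := ∀ (array : List Int) (min_run : Int), Dom_separate_array array min_run → Pre_separate_array array min_run → Spec_separate_array array min_run (separate_array array min_run)

-- ===== LEMMAS AND PROOFS =====

-- A's hand insertion sort is Python's stable sorted(·, key=abs, reverse=True)
theorem pvInsertAbs_eq (k : Int) (l : List Int) :
    pvInsertAbs k l = PySem.List.insertBy (fun a b => decide (|b| < |a|)) k l := by
  induction l with
  | nil => rfl
  | cons y ys ih => simp [pvInsertAbs, PySem.List.insertBy, ih]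

theorem pvInsertionSort_eq_sortRun (l : List Int) : pvInsertionSort l = pvSortRun l := by
  rw [pvSortRun, PySem.List.sorted_rev_eq_foldl_insertBy]
  simp [pvInsertionSort, pvInsertAbs_eq]

-- adjacent-pair flags of run ++ [x], for a nonempty run ending in lst
theorem pvAscAbs_append (cur : List Int) (lst x : Int) (h : cur.getLast? = some lst) :
    pvAscAbs (cur ++ [x]) = (pvAscAbs cur && (|lst| ≤ |x| : Bool)) := by
  induction cur with
  | nil => simp at h
  | cons a t ih =>
    cases t with
    | nil => simp_all [pvAscAbs]
    | cons b t' =>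
      have h' : (b :: t').getLast? = some lst := by
        simpa [List.getLast?_cons_cons] using h
      have ih' := ih h'
      simp only [List.cons_append] at ih' ⊢
      simp only [pvAscAbs, ih', Bool.and_assoc]

theorem pvDescAbs_append (cur : List Int) (lst x : Int) (h : cur.getLast? = some lst) :
    pvDescAbs (cur ++ [x]) = (pvDescAbs cur && (|x| ≤ |lst| : Bool)) := by
  induction cur with
  | nil => simp at h
  | cons a t ih =>
    cases t with
    | nil => simp_all [pvDescAbs]
    | cons b t' =>
      have h' : (b :: t').getLast? = some lst := by
        simpa [List.getLast?_cons_cons] using h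
      have ih' := ih h'
      simp only [List.cons_append] at ih' ⊢
      simp only [pvDescAbs, ih', Bool.and_assoc]

-- B's post-loop fixup
def pvFinalize (minRun : Int) (runs : List (List Int)) : List (List Int) :=
  let lastr := (runs.getLast?).getD []
  if ((lastr.length : Int) ≤ minRun) then runs.dropLast ++ [pvSortRun lastr] else runs

theorem pvFinalize_concat (minRun : Int) (pre : List (List Int)) (v : List Int) :
    pvFinalize minRun (pre ++ [v]) =
      if ((v.length : Int) ≤ minRun) then pre ++ [pvSortRun v] else pre ++ [v] := by
  simp [pvFinalize]

theorem pvSortRun_single (x : Int) : pvSortRun [x] = [x] := rfl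

-- A's four-way branch over the two flags is one grow/close decision (B's form)
theorem pvBranchA {α : Type} (asc desc : Bool) (l a : Int) (app cls : α) :
    (if asc && !desc then (if l < a then app else cls)
     else if !asc && desc then (if a < l then app else cls)
     else if !asc && !desc then cls
     else if a = l then app else cls)
    = if (if asc && desc then (a = l : Bool)
          else ((asc && (l < a : Bool)) || (desc && (a < l : Bool)))) = true
      then app else cls := by
  cases asc <;> cases desc <;> simp

-- main loop correspondence: with correct flags, A's loop equals B's loop followed by pvFinalize
theorem pvLoop_eq (minRun : Int) (hmr : 1 ≤ minRun) :
    ∀ (rest : List Int) (x : Int) (runs : List (List Int)),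
      pvSepLoopA minRun (x :: rest) runs =
        pvFinalize minRun
          (pvSepLoopB minRun (x :: rest) runs (pvAscAbs ((runs.getLast?).getD []))
            (pvDescAbs ((runs.getLast?).getD []))) := by
  intro rest
  induction rest with
  | nil =>
    intro x runs
    simp only [pvSepLoopA, pvSepLoopB]
    by_cases hfill : (((runs.getLast?).getD []).length : Int) < minRun
    · -- filling branch at the last element: A sorts in the loop, B sorts in pvFinalize
      simp only [hfill, if_pos, List.isEmpty_nil]
      have hlen : (((((runs.getLast?).getD []) ++ [x]).length : Int) ≤ minRun) := by
        simp only [List.length_append, List.length_cons, List.length_nil]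
        push_cast; omega
      cases ((runs.getLast?).getD []).getLast? <;>
      · rw [pvFinalize_concat, if_pos hlen, pvInsertionSort_eq_sortRun]
    · -- run is full
      have hne : ((runs.getLast?).getD []).getLast?
          = some ((((runs.getLast?).getD []).getLast?).getD 0) := by
        cases hg : ((runs.getLast?).getD []).getLast? with
        | none =>
          exfalso
          rw [List.getLast?_eq_none_iff.mp hg] at hfill
          simp at hfill; omega
        | some v => rfl
      rw [if_neg hfill, if_neg hfill, pvBranchA]
      have hlen : ¬ (((((runs.getLast?).getD []) ++ [x]).length : Int) ≤ minRun) := by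
        simp only [List.length_append, List.length_cons, List.length_nil]
        push_cast; omega
      have h1 : ((([x] : List Int).length : Int) ≤ minRun) := by simp; omega
      split_ifs <;>
        first
          | rw [pvFinalize_concat, if_neg hlen]
          | rw [pvFinalize_concat, if_pos h1, pvSortRun_single, pvInsertionSort_eq_sortRun]
  | cons y rest' ih =>
    intro x runs
    have hih := ih y
    have hnil : (y :: rest').isEmpty = false := rfl
    generalize hTL : y :: rest' = tl at hih hnil
    simp only [pvSepLoopA, pvSepLoopB, hnil, Bool.false_eq_true, if_false]
    by_cases hfill : (((runs.getLast?).getD []).length : Int) < minRun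
    · simp only [hfill, if_pos]
      cases hg : ((runs.getLast?).getD []).getLast? with
      | none =>
        have hc : (runs.getLast?).getD [] = [] := List.getLast?_eq_none_iff.mp hg
        rw [hih]
        simp [hc, pvAscAbs, pvDescAbs]
      | some lstv =>
        rw [hih]
        simp [pvAscAbs_append _ lstv x hg, pvDescAbs_append _ lstv x hg]
    · have hne : ((runs.getLast?).getD []).getLast?
          = some ((((runs.getLast?).getD []).getLast?).getD 0) := by
        cases hg : ((runs.getLast?).getD []).getLast? with
        | none =>
          exfalso
          rw [List.getLast?_eq_none_iff.mp hg] at hfill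
          simp at hfill; omega
        | some v => rfl
      rw [if_neg hfill, if_neg hfill, pvBranchA]
      have hA := pvAscAbs_append _ ((((runs.getLast?).getD []).getLast?).getD 0) x hne
      have hD := pvDescAbs_append _ ((((runs.getLast?).getD []).getLast?).getD 0) x hne
      split_ifs
      all_goals rw [hih]
      all_goals simp [hA, hD, pvInsertionSort_eq_sortRun, pvAscAbs, pvDescAbs]

-- ===== VERDICT (by name: the statement is the Claim_ definition above) =====
theorem separate_array_spec : Claim_equal_separate_array := by
  intro array min_run _ hpre
  unfold Spec_separate_array separate_array separate_array_alt
  cases array with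
  | nil =>
    show pvSepLoopA min_run [] [[]] = pvFinalize min_run (pvSepLoopB min_run [] [[]] true true)
    simp only [pvSepLoopA, pvSepLoopB, pvFinalize]
    split_ifs <;> rfl
  | cons x rest =>
    have hmr : 1 ≤ min_run := by
      rcases hpre with h | h
      · exact absurd h (by simp)
      · exact h
    have := pvLoop_eq min_run hmr rest x [[]]
    simpa [pvAscAbs, pvDescAbs, pvFinalize] using this
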